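-- pv_equiv track=rewrite | github.com/gbinside/code_tests | queens.py | calc_moves
-- ===== SOURCE A (Python) =====
-- SIZE = 8
--
-- def calc_moves(board, row):
--     moves = list(range(SIZE))  # I can do all this moves 0..N-1, then I remove some of them
--     if row in board:
--         moves = [x for x in moves if x>board[row]]  # if I am recomputing a line I already have, I consider higher Queen position than the last tried.
--     for k,v in board.items():  # for all the queens already on the board
--         if k>=row:  # if I am on the same row or a bigger one, skip, I am backtracing
--             continue
--         try:
--             moves.remove(v)  # remove vertical queen attacked cells
--         except:
--             pass
--         try:
--             moves.remove(v-(row-k))  # remove diagonal going down-left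
--         except:
--             pass
--         try:
--             moves.remove(v+(row-k))  # remove diagonal going down-right
--         except:
--             pass
--     return moves
-- ===== SOURCE B (Python) =====
-- SIZE = 8
--
-- def calc_moves(board, row):
--     # test each candidate column against all earlier queens instead of removing attacked cells
--     def ok(x):
--         if row in board and x <= board[row]:
--             return False
--         for k, v in board.items():
--             if k < row and x in (v, v - (row - k), v + (row - k)):
--                 return False
--         return True
--     return [x for x in range(SIZE) if ok(x)]
-- ===== Notes on version B (the rewrite author's own statement) =====
-- stated objective: idiomatic
-- what changed: Instead of building the full column list and deleting attacked cells queen-by-queen with list.remove, B filters range(SIZE) keeping each candidate column iff it survives the board[row] bound and every earlier queen's vertical/diagonal attacks (transposed loop nesting, no list mutation).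
import Mathlib
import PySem

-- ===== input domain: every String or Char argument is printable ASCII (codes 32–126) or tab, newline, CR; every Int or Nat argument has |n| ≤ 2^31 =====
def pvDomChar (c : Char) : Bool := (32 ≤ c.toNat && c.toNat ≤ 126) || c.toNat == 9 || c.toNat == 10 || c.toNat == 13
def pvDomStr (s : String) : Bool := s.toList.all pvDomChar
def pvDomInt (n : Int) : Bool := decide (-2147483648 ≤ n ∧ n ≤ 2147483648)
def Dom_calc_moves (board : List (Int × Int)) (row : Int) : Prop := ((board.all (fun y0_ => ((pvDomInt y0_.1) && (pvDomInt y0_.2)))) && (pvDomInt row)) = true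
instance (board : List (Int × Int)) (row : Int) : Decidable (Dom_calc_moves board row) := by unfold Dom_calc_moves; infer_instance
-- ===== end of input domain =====

-- B filters each candidate column against all earlier queens instead of deleting attacked cells
-- queen-by-queen with list.remove; same cost, different decomposition (no list mutation).

-- ===== PORT A =====
-- try: moves.remove(v) except: pass
def pyTryRemove (ms : List Int) (v : Int) : List Int :=
  match PySem.List.remove? ms v with
  | some l => l
  | none => ms

def calc_moves (board : List (Int × Int)) (row : Int) : List Int :=
  let d := PySem.Dict.ofList board
  let moves := PySem.List.pyRange 0 8 1
  let moves :=
    match d.get? row with   -- if row in board: moves = [x for x in moves if x > board[row]]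
    | some w => moves.filter (fun x => decide (w < x))
    | none => moves
  d.items.foldl (fun ms p =>
    if row ≤ p.1 then ms   -- if k >= row: continue
    else
      let ms := pyTryRemove ms p.2
      let ms := pyTryRemove ms (p.2 - (row - p.1))
      pyTryRemove ms (p.2 + (row - p.1))) moves

-- ===== PORT B =====
def calc_moves_alt (board : List (Int × Int)) (row : Int) : List Int :=
  let d := PySem.Dict.ofList board
  (PySem.List.pyRange 0 8 1).filter (fun x =>
    (match d.get? row with   -- if row in board and x <= board[row]: not ok
     | some w => !decide (x ≤ w)
     | none => true) &&
    d.items.all (fun p =>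
      !(decide (p.1 < row) &&
        (decide (x = p.2) || decide (x = p.2 - (row - p.1)) || decide (x = p.2 + (row - p.1))))))

-- ===== PRECONDITION & SPEC =====
def Spec_calc_moves (board : List (Int × Int)) (row : Int) (out : List Int) : Prop := out = calc_moves_alt board row
instance (board : List (Int × Int)) (row : Int) (out : List Int) : Decidable (Spec_calc_moves board row out) := by unfold Spec_calc_moves; infer_instance

-- ===== CLAIM (what is proved, stated in full; the proofs are below) =====
def Claim_equal_calc_moves : Prop := ∀ (board : List (Int × Int)) (row : Int), Dom_calc_moves board row → Spec_calc_moves board row (calc_moves board row)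

-- ===== LEMMAS AND PROOFS =====

theorem pyTryRemove_eq_erase (ms : List Int) (v : Int) : pyTryRemove ms v = ms.erase v := by
  unfold pyTryRemove
  by_cases h : v ∈ ms
  · rw [PySem.List.remove?_eq_some_erase ms v h]
  · rw [(PySem.List.remove?_eq_none_iff ms v).mpr h, List.erase_of_not_mem h]

theorem fold_erase_eq_filter (row : Int) (qs : List (Int × Int)) (m : List Int) (hm : m.Nodup) :
    qs.foldl (fun ms p =>
      if row ≤ p.1 then ms
      else ((ms.erase p.2).erase (p.2 - (row - p.1))).erase (p.2 + (row - p.1))) m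
    = m.filter (fun x => qs.all (fun p =>
        !(decide (p.1 < row) &&
          (decide (x = p.2) || decide (x = p.2 - (row - p.1)) || decide (x = p.2 + (row - p.1)))))) := by
  induction qs generalizing m with
  | nil => simp
  | cons q qs ih =>
    simp only [List.foldl_cons]
    by_cases h : row ≤ q.1
    · rw [if_pos h, ih m hm]
      apply List.filter_congr
      intro x _
      simp [not_lt.mpr h]
    · rw [if_neg h]
      rw [List.Nodup.erase_eq_filter hm,
          List.Nodup.erase_eq_filter (hm.filter _),
          List.Nodup.erase_eq_filter ((hm.filter _).filter _),
          List.filter_filter, List.filter_filter,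
          ih _ (hm.filter _), List.filter_filter]
      apply List.filter_congr
      intro x _
      have hq : q.1 < row := not_le.mp h
      simp only [List.all_cons, hq, decide_true, Bool.true_and]
      by_cases e1 : x = q.2 <;> by_cases e2 : x = q.2 - (row - q.1) <;>
        by_cases e3 : x = q.2 + (row - q.1) <;> simp [e1, e2, e3]

theorem fold_remove_eq_filter (row : Int) (qs : List (Int × Int)) (m : List Int) (hm : m.Nodup) :
    qs.foldl (fun ms p =>
      if row ≤ p.1 then ms
      else
        let ms := pyTryRemove ms p.2
        let ms := pyTryRemove ms (p.2 - (row - p.1))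
        pyTryRemove ms (p.2 + (row - p.1))) m
    = m.filter (fun x => qs.all (fun p =>
        !(decide (p.1 < row) &&
          (decide (x = p.2) || decide (x = p.2 - (row - p.1)) || decide (x = p.2 + (row - p.1)))))) := by
  have hfun : (fun (ms : List Int) (p : Int × Int) =>
      if row ≤ p.1 then ms
      else
        let ms := pyTryRemove ms p.2
        let ms := pyTryRemove ms (p.2 - (row - p.1))
        pyTryRemove ms (p.2 + (row - p.1)))
      = (fun ms p =>
      if row ≤ p.1 then ms
      else ((ms.erase p.2).erase (p.2 - (row - p.1))).erase (p.2 + (row - p.1))) := by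
    funext ms p
    simp [pyTryRemove_eq_erase]
  rw [hfun, fold_erase_eq_filter row qs m hm]

-- ===== VERDICT (by name: the statement is the Claim_ definition above) =====
theorem calc_moves_spec : Claim_equal_calc_moves := by
  intro board row _
  unfold Spec_calc_moves
  simp only [calc_moves, calc_moves_alt]
  cases hg : (PySem.Dict.ofList board).get? row with
  | none =>
    rw [fold_remove_eq_filter row _ _ (PySem.List.nodup_pyRange_one 0 8)]
    apply List.filter_congr
    intro x _
    simp
  | some w =>
    rw [fold_remove_eq_filter row _ _ ((PySem.List.nodup_pyRange_one 0 8).filter _),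
        List.filter_filter]
    apply List.filter_congr
    intro x _
    by_cases hx : w < x
    · simp [hx, not_le.mpr hx]
    · simp [hx, not_lt.mp hx]
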